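-- pv_equiv track=rewrite | github.com/O-direction/data-mining | Apriori.py | no_cut_candidate_item
-- ===== SOURCE A (Python) =====
-- def no_cut_candidate_item(L, text):
--     C = {}
--     # 初始化候选项集
--     for k1 in L.keys():
--         for k2 in L.keys():
--             if k1 != k2:
--                 if k2 + ' ' + k1 in C.keys():
--                     continue
--                 C[k1 + ' ' + k2] = 0
--     # 遍历数据库，每个key如果存在于数据库中对应的value就加一
--     for text_line in text:
--         # 以空格分割为两个list，是否是包含关系
--         text_split = text_line.split(' ')
--         for C_key in C.keys():
--             key_split = C_key.split(' ')
--             if set(key_split) <= set(text_split):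
--                 C[C_key] += 1
--     return C
-- ===== SOURCE B (Python) =====
-- def no_cut_candidate_item(L, text):
--     keys = list(L)
--     # candidate generation: ordered pair (k1, k2) kept unless the reversed key already exists
--     C = {}
--     for k1 in keys:
--         for k2 in keys:
--             if k1 != k2 and k2 + ' ' + k1 not in C:
--                 C[k1 + ' ' + k2] = 0
--     # support counting: instead of testing every candidate against every line,
--     # find the items PRESENT in each line and enumerate only pairs of present items.
--     # Correct because (k1+' '+k2).split(' ') == k1.split(' ') + k2.split(' '), so a
--     # candidate's word set is contained in a line's word set iff both items' word sets are.
--     word_of = {k: set(k.split(' ')) for k in keys}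
--     for line in text:
--         lw = set(line.split(' '))
--         present = [k for k in keys if word_of[k] <= lw]
--         hits = set()
--         for k1 in present:
--             for k2 in present:
--                 if k1 != k2:
--                     c = k1 + ' ' + k2
--                     if c in C:
--                         hits.add(c)
--         for c in hits:
--             C[c] += 1
--     return C
-- ===== Notes on version B (the rewrite author's own statement) =====
-- stated objective: faster
-- what changed: B replaces A's per-line scan over every candidate (splitting each candidate key and testing subset inclusion against the line) by the inverse enumeration: per line it computes the set of items actually present and enumerates only ordered pairs of present items, collecting the hit candidates in a set and incrementing them; correct because (k1+' '+k2).split(' ') == k1.split(' ') + k2.split(' '), so a candidate is supported by a line iff both of its items are present.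
import Mathlib
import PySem

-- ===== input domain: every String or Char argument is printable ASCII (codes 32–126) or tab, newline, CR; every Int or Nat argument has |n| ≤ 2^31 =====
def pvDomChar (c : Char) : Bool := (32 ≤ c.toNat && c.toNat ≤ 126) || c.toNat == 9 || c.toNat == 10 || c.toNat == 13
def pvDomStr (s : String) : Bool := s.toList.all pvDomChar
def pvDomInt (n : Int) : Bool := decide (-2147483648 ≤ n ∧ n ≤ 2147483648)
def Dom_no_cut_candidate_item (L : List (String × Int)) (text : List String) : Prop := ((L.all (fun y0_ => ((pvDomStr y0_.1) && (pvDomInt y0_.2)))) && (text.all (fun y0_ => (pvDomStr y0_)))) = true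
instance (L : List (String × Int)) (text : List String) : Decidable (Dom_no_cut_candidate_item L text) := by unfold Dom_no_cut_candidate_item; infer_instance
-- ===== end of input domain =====

-- B counts support by enumerating, per text line, only the pairs of items PRESENT in that line
-- (instead of A's test of every candidate against every line); objective: faster on inputs whose
-- lines contain few of the items.

-- ===== PORT A =====
-- Strings are handled as lists of code points (String.toList / String.mk bridge);
-- `x.split(' ')` has a nonempty literal separator, so it is PySem.Chars.splitOn · [' '] (exact).
def no_cut_candidate_item (L : List (String × Int)) (text : List String) : List (String × Int) :=
  let keys : List (List Char) := PySem.List.dedup (L.map (fun p => p.1.toList))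
  let C0 : PySem.Dict (List Char) Int :=
    keys.foldl (fun C k1 =>
      keys.foldl (fun C k2 =>
        if k1 ≠ k2 then
          if C.contains (k2 ++ ' ' :: k1) then C
          else C.insert (k1 ++ ' ' :: k2) 0
        else C) C) PySem.Dict.empty
  let C1 : PySem.Dict (List Char) Int :=
    text.foldl (fun C line =>
      let ts := PySem.Chars.splitOn line.toList [' ']
      C.keys.foldl (fun C' ck =>
        let ks := PySem.Chars.splitOn ck [' ']
        if PySem.Set.issubset (PySem.Set.ofList ks) (PySem.Set.ofList ts) then
          C'.modify ck 0 (· + 1)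
        else C') C) C0
  C1.items.map (fun p => (String.mk p.1, p.2))

-- ===== PORT B =====
-- Source B's `word_of` dict maps every key k to set(k.split(' ')); it is pure memoisation, ported as
-- the function it tabulates.
def altWordOf (k : List Char) : PySem.Set (List Char) :=
  PySem.Set.ofList (PySem.Chars.splitOn k [' '])

def no_cut_candidate_item_alt (L : List (String × Int)) (text : List String) : List (String × Int) :=
  let keys : List (List Char) := PySem.List.dedup (L.map (fun p => p.1.toList))
  let C0 : PySem.Dict (List Char) Int :=
    keys.foldl (fun C k1 =>
      keys.foldl (fun C k2 =>
        if k1 ≠ k2 ∧ ¬ C.contains (k2 ++ ' ' :: k1) = true then C.insert (k1 ++ ' ' :: k2) 0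
        else C) C) PySem.Dict.empty
  let Cfin : PySem.Dict (List Char) Int :=
    text.foldl (fun C line =>
      let lw := PySem.Set.ofList (PySem.Chars.splitOn line.toList [' '])
      let present := keys.filter (fun k => PySem.Set.issubset (altWordOf k) lw)
      -- hits: the set of candidate keys both of whose generating items occur in the line
      let hits : PySem.Set (List Char) :=
        present.foldl (fun h k1 =>
          present.foldl (fun h k2 =>
            if k1 ≠ k2 ∧ C.contains (k1 ++ ' ' :: k2) = true then PySem.Set.add h (k1 ++ ' ' :: k2)
            else h) h) PySem.Set.empty
      -- `for c in hits: C[c] += 1` — final dict independent of the set's iteration order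
      hits.foldl (fun C' c => C'.modify c 0 (· + 1)) C) C0
  Cfin.items.map (fun p => (String.mk p.1, p.2))

-- ===== PRECONDITION & SPEC =====
def Spec_no_cut_candidate_item (L : List (String × Int)) (text : List String) (out : List (String × Int)) : Prop := out = no_cut_candidate_item_alt L text
instance (L : List (String × Int)) (text : List String) (out : List (String × Int)) : Decidable (Spec_no_cut_candidate_item L text out) := by unfold Spec_no_cut_candidate_item; infer_instance

-- ===== CLAIM =====
def Claim_equal_no_cut_candidate_item : Prop := ∀ (L : List (String × Int)) (text : List String), Dom_no_cut_candidate_item L text → Spec_no_cut_candidate_item L text (no_cut_candidate_item L text)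

-- ===== LEMMAS AND PROOFS =====

-- ---- splitOn on a single-space separator distributes over `a ++ ' ' :: b` ----
theorem splitGo_nil (f : Nat) (cur : List Char) (acc : List (List Char)) :
    PySem.Chars.splitOn.go [' '] (f + 1) [] cur acc = acc.reverse ++ [cur.reverse] := by
  show (cur.reverse :: acc).reverse = acc.reverse ++ [cur.reverse]
  simp

theorem splitGo_cons (f : Nat) (c : Char) (rest cur : List Char) (acc : List (List Char)) :
    PySem.Chars.splitOn.go [' '] (f + 1) (c :: rest) cur acc =
      if c = ' ' then PySem.Chars.splitOn.go [' '] f rest [] (cur.reverse :: acc)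
      else PySem.Chars.splitOn.go [' '] f rest (c :: cur) acc := by
  rw [PySem.Chars.splitOn.go]
  by_cases h : c = ' '
  · subst h; simp [List.isPrefixOf]
  · simp [List.isPrefixOf, Ne.symm h, h]

theorem splitGo_fuel (l : List Char) : ∀ (f : Nat) (cur : List Char) (acc : List (List Char)),
    l.length < f →
    PySem.Chars.splitOn.go [' '] f l cur acc = PySem.Chars.splitOn.go [' '] (l.length + 1) l cur acc := by
  induction l with
  | nil =>
    intro f cur acc hf
    obtain ⟨f', rfl⟩ := Nat.exists_eq_add_of_lt hf
    rw [splitGo_nil, splitGo_nil]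
  | cons c rest ih =>
    intro f cur acc hf
    obtain ⟨f', rfl⟩ : ∃ f', f = f' + 1 := ⟨f - 1, by omega⟩
    rw [splitGo_cons, List.length_cons, splitGo_cons]
    have hr : rest.length < f' := by simp at hf; omega
    by_cases h : c = ' '
    · rw [if_pos h, if_pos h, ih f' [] _ hr]
    · rw [if_neg h, if_neg h, ih f' (c :: cur) _ hr, ih rest.length.succ (c :: cur) _ (Nat.lt_succ_self _)]

theorem splitGo_acc (l : List Char) : ∀ (f : Nat) (cur : List Char) (acc : List (List Char)),
    l.length < f →
    PySem.Chars.splitOn.go [' '] f l cur acc = acc.reverse ++ PySem.Chars.splitOn.go [' '] f l cur [] := by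
  induction l with
  | nil =>
    intro f cur acc hf
    obtain ⟨f', rfl⟩ := Nat.exists_eq_add_of_lt hf
    rw [splitGo_nil, splitGo_nil]; simp
  | cons c rest ih =>
    intro f cur acc hf
    obtain ⟨f', rfl⟩ : ∃ f', f = f' + 1 := ⟨f - 1, by omega⟩
    have hr : rest.length < f' := by simp at hf; omega
    rw [splitGo_cons, splitGo_cons]
    by_cases h : c = ' '
    · rw [if_pos h, if_pos h, ih f' [] _ hr, ih f' [] [cur.reverse] hr]
      simp
    · rw [if_neg h, if_neg h, ih f' (c :: cur) acc hr]

theorem splitGo_append (b : List Char) (a : List Char) : ∀ (cur : List Char),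
    PySem.Chars.splitOn.go [' '] (a.length + b.length + 2) (a ++ ' ' :: b) cur [] =
      PySem.Chars.splitOn.go [' '] (a.length + 1) a cur [] ++
        PySem.Chars.splitOn.go [' '] (b.length + 1) b [] [] := by
  induction a with
  | nil =>
    intro cur
    have h1 : ([] : List Char).length + b.length + 2 = (b.length + 1) + 1 := by simp
    rw [h1]
    show PySem.Chars.splitOn.go [' '] (b.length + 1 + 1) (' ' :: b) cur [] = _
    rw [splitGo_cons, if_pos rfl, splitGo_nil]
    rw [splitGo_acc b _ [] [cur.reverse] (Nat.lt_succ_self _)]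
    simp
  | cons c rest ih =>
    intro cur
    have h1 : (c :: rest).length + b.length + 2 = (rest.length + b.length + 2) + 1 := by simp; omega
    rw [h1]
    show PySem.Chars.splitOn.go [' '] ((rest.length + b.length + 2) + 1) (c :: (rest ++ ' ' :: b)) cur [] = _
    rw [splitGo_cons]
    have h2 : (c :: rest).length + 1 = (rest.length + 1) + 1 := by simp
    rw [h2, splitGo_cons]
    by_cases h : c = ' '
    · rw [if_pos h, if_pos h]
      have hlen : (rest ++ ' ' :: b).length < rest.length + b.length + 2 := by simp; omega
      rw [splitGo_acc _ _ [] [cur.reverse] hlen, splitGo_fuel _ _ [] [] hlen]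
      have : (rest ++ ' ' :: b).length + 1 = rest.length + b.length + 2 := by simp; omega
      rw [this, ih []]
      rw [splitGo_acc rest _ [] [cur.reverse] (Nat.lt_succ_self _)]
      simp
    · rw [if_neg h, if_neg h]
      have hlen : (rest ++ ' ' :: b).length < rest.length + b.length + 2 := by simp; omega
      rw [splitGo_fuel _ _ (c :: cur) [] hlen]
      have : (rest ++ ' ' :: b).length + 1 = rest.length + b.length + 2 := by simp; omega
      rw [this, ih (c :: cur)]

theorem splitOn_space_append (a b : List Char) :
    PySem.Chars.splitOn (a ++ ' ' :: b) [' '] =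
      PySem.Chars.splitOn a [' '] ++ PySem.Chars.splitOn b [' '] := by
  show PySem.Chars.splitOn.go [' '] ((a ++ ' ' :: b).length + 1) (a ++ ' ' :: b) [] [] = _
  have : (a ++ ' ' :: b).length + 1 = a.length + b.length + 2 := by simp; omega
  rw [this, splitGo_append b a []]
  rfl

theorem issubset_ofList_append (xs ys : List (List Char)) (t : PySem.Set (List Char)) :
    PySem.Set.issubset (PySem.Set.ofList (xs ++ ys)) t = true ↔
      (PySem.Set.issubset (PySem.Set.ofList xs) t = true ∧
       PySem.Set.issubset (PySem.Set.ofList ys) t = true) := by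
  simp only [PySem.Set.issubset_iff, PySem.Set.mem_ofList, List.mem_append]
  constructor
  · exact fun h => ⟨fun x hx => h x (Or.inl hx), fun x hx => h x (Or.inr hx)⟩
  · rintro ⟨h1, h2⟩ x (hx | hx)
    · exact h1 x hx
    · exact h2 x hx

-- the A-side subset test on a candidate `a ++ ' ' :: b` is the conjunction of the item tests
theorem subset_cand_iff (a b : List Char) (t : PySem.Set (List Char)) :
    PySem.Set.issubset (PySem.Set.ofList (PySem.Chars.splitOn (a ++ ' ' :: b) [' '])) t = true ↔
      (PySem.Set.issubset (altWordOf a) t = true ∧ PySem.Set.issubset (altWordOf b) t = true) := by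
  rw [splitOn_space_append, issubset_ofList_append]; rfl

-- ---- the generation fold: A's step and B's step are the same function ----
theorem genStep_eq (k1 : List Char) :
    (fun (C : PySem.Dict (List Char) Int) (k2 : List Char) =>
      if k1 ≠ k2 then
        if C.contains (k2 ++ ' ' :: k1) then C
        else C.insert (k1 ++ ' ' :: k2) 0
      else C) =
    (fun (C : PySem.Dict (List Char) Int) (k2 : List Char) =>
      if k1 ≠ k2 ∧ ¬ C.contains (k2 ++ ' ' :: k1) = true then C.insert (k1 ++ ' ' :: k2) 0
      else C) := by
  funext C k2
  by_cases h1 : k1 ≠ k2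
  · by_cases h2 : C.contains (k2 ++ ' ' :: k1) = true
    · rw [if_pos h1, if_pos h2, if_neg (fun hc => hc.2 h2)]
    · rw [if_pos h1, if_neg h2, if_pos ⟨h1, h2⟩]
  · rw [if_neg h1, if_neg (fun hc => h1 hc.1)]

-- invariant of the candidate-generation fold: all values 0, keys distinct, and every key is
-- `a ++ ' ' :: b` for two distinct items a b of ks0
def genInv (ks0 : List (List Char)) (C : PySem.Dict (List Char) Int) : Prop :=
  C.items = C.keys.map (fun k => (k, (0 : Int))) ∧ C.keys.Nodup ∧
    ∀ c ∈ C.keys, ∃ a, a ∈ ks0 ∧ ∃ b, b ∈ ks0 ∧ a ≠ b ∧ c = a ++ ' ' :: b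

theorem genStep_inv (ks0 : List (List Char)) (k1 k2 : List Char) (hk1 : k1 ∈ ks0) (hk2 : k2 ∈ ks0)
    (C : PySem.Dict (List Char) Int) (h : genInv ks0 C) :
    genInv ks0 (if k1 ≠ k2 ∧ ¬ C.contains (k2 ++ ' ' :: k1) = true then C.insert (k1 ++ ' ' :: k2) 0 else C) := by
  by_cases hc : k1 ≠ k2 ∧ ¬ C.contains (k2 ++ ' ' :: k1) = true
  · rw [if_pos hc]
    by_cases hk : C.contains (k1 ++ ' ' :: k2) = true
    · have hitems : (C.insert (k1 ++ ' ' :: k2) 0).items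
          = C.items.map (fun p => if p.1 == k1 ++ ' ' :: k2 then (k1 ++ ' ' :: k2, (0 : Int)) else p) :=
        PySem.Dict.items_insert_of_contains C 0 hk
      have hsame : (C.insert (k1 ++ ' ' :: k2) 0).items = C.items := by
        rw [hitems, h.1, List.map_map]
        apply List.map_congr_left
        intro k hkmem
        by_cases he : k = k1 ++ ' ' :: k2
        · simp [he]
        · simp only [Function.comp_apply, beq_eq_false_iff_ne.mpr he, Bool.false_eq_true, if_false]
      have hkeys : (C.insert (k1 ++ ' ' :: k2) 0).keys = C.keys := by
        show ((C.insert (k1 ++ ' ' :: k2) 0).items).map (·.1) = _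
        rw [hsame]; rfl
      exact ⟨by rw [hsame, hkeys]; exact h.1, by rw [hkeys]; exact h.2.1,
        by rw [hkeys]; exact h.2.2⟩
    · have hitems : (C.insert (k1 ++ ' ' :: k2) 0).items = C.items ++ [(k1 ++ ' ' :: k2, (0 : Int))] :=
        PySem.Dict.items_insert_of_not_contains C 0 (by simpa using hk)
      have hkeys : (C.insert (k1 ++ ' ' :: k2) 0).keys = C.keys ++ [k1 ++ ' ' :: k2] := by
        show ((C.insert (k1 ++ ' ' :: k2) 0).items).map (·.1) = _
        rw [hitems]; simp [PySem.Dict.keys]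
      have hnotmem : k1 ++ ' ' :: k2 ∉ C.keys := by
        intro hm
        exact hk (by rw [PySem.Dict.contains_eq_decide_mem_keys]; simpa using hm)
      refine ⟨?_, ?_, ?_⟩
      · rw [hitems, hkeys, h.1]; simp
      · rw [hkeys, List.nodup_append]
        exact ⟨h.2.1, List.nodup_singleton _,
          fun a ha b hb => by simp at hb; subst hb; exact fun e => hnotmem (e ▸ ha)⟩
      · rw [hkeys]
        intro c hcmem
        rcases List.mem_append.mp hcmem with hcl | hcr
        · exact h.2.2 c hcl
        · exact ⟨k1, hk1, k2, hk2, hc.1, by simpa using hcr⟩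
  · rw [if_neg hc]; exact h

theorem genInner_inv (ks0 : List (List Char)) (k1 : List Char) (hk1 : k1 ∈ ks0) :
    ∀ (ks : List (List Char)), (∀ k ∈ ks, k ∈ ks0) →
    ∀ (C : PySem.Dict (List Char) Int), genInv ks0 C →
    genInv ks0 (ks.foldl (fun C k2 =>
      if k1 ≠ k2 ∧ ¬ C.contains (k2 ++ ' ' :: k1) = true then C.insert (k1 ++ ' ' :: k2) 0 else C) C) := by
  intro ks
  induction ks with
  | nil => intro _ C h; exact h
  | cons k2 rest ih =>
    intro hsub C h
    exact ih (fun k hk => hsub k (by simp [hk])) _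
      (genStep_inv ks0 k1 k2 hk1 (hsub k2 (by simp)) C h)

theorem genOuter_inv (ks0 : List (List Char)) :
    ∀ (ks : List (List Char)), (∀ k ∈ ks, k ∈ ks0) →
    ∀ (C : PySem.Dict (List Char) Int), genInv ks0 C →
    genInv ks0 (ks.foldl (fun C k1 => ks0.foldl (fun C k2 =>
      if k1 ≠ k2 ∧ ¬ C.contains (k2 ++ ' ' :: k1) = true then C.insert (k1 ++ ' ' :: k2) 0 else C) C) C) := by
  intro ks
  induction ks with
  | nil => intro _ C h; exact h
  | cons k1 rest ih =>
    intro hsub C h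
    exact ih (fun k hk => hsub k (by simp [hk])) _
      (genInner_inv ks0 k1 (hsub k1 (by simp)) ks0 (fun _ hk => hk) C h)

-- ---- A's counting loop (one pass over a snapshot of the keys) ----
theorem modify_loop (q : List Char → Bool) :
    ∀ (ks : List (List Char)) (d : PySem.Dict (List Char) Int),
    d.keys.Nodup → ks.Nodup → (∀ k ∈ ks, d.contains k = true) →
    (ks.foldl (fun d' k => if q k then d'.modify k 0 (· + 1) else d') d).items =
      d.items.map (fun p => if p.1 ∈ ks ∧ q p.1 = true then (p.1, p.2 + 1) else p) := by
  intro ks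
  induction ks with
  | nil =>
    intro d _ _ _
    simp
  | cons k rest ih =>
    intro d hdnd hnd hc
    rw [List.foldl_cons]
    by_cases hqk : q k = true
    · rw [if_pos hqk]
      have hck : d.contains k = true := hc k (by simp)
      have hmod : (d.modify k 0 (· + 1)) = d.insert k (d.getD k 0 + 1) := rfl
      have hitems1 : (d.modify k 0 (· + 1)).items
          = d.items.map (fun p => if p.1 == k then (k, d.getD k 0 + 1) else p) := by
        rw [hmod, PySem.Dict.items_insert_of_contains d _ hck]
      have hkeys1 : (d.modify k 0 (· + 1)).keys = d.keys := by
        rw [hmod, PySem.Dict.keys_insert_of_contains d _ hck]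
      have hc1 : ∀ x ∈ rest, (d.modify k 0 (· + 1)).contains x = true := by
        intro x hx
        rw [PySem.Dict.contains_eq_decide_mem_keys, hkeys1,
          ← PySem.Dict.contains_eq_decide_mem_keys]
        exact hc x (by simp [hx])
      rw [ih _ (hkeys1 ▸ hdnd) hnd.of_cons hc1, hitems1, List.map_map]
      apply List.map_congr_left
      intro p hp
      have hgd : ∀ pp ∈ d.items, d.getD pp.1 0 = pp.2 := by
        intro pp hpp
        rw [PySem.Dict.getD_eq_get?_getD, PySem.Dict.get?_of_mem_items d (by exact hpp) hdnd]
        rfl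
      by_cases hpk : p.1 = k
      · have hknr : k ∉ rest := (List.nodup_cons.mp hnd).1
        have hg : d.getD k 0 = p.2 := hpk ▸ hgd p hp
        simp [hpk, hknr, hqk, hg]
      · have hne : (p.1 == k) = false := beq_eq_false_iff_ne.mpr hpk
        simp [List.mem_cons, hpk]
    · rw [if_neg hqk]
      rw [ih d hdnd hnd.of_cons (fun x hx => hc x (by simp [hx]))]
      apply List.map_congr_left
      intro p hp
      by_cases hpk : p.1 = k
      · simp [hpk, hqk]
      · simp [List.mem_cons, hpk]

-- A's database loop: each candidate's value ends as its support count
theorem text_loop :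
    ∀ (lines : List String) (d : PySem.Dict (List Char) Int)
      (cks : List (List Char)) (v : List Char → Int),
    cks.Nodup →
    d.items = cks.map (fun ck => (ck, v ck)) →
    (lines.foldl (fun C line =>
      C.keys.foldl (fun C' ck =>
        if PySem.Set.issubset (PySem.Set.ofList (PySem.Chars.splitOn ck [' ']))
            (PySem.Set.ofList (PySem.Chars.splitOn line.toList [' '])) then
          C'.modify ck 0 (· + 1)
        else C') C) d).items
      = cks.map (fun ck => (ck,
          v ck + (lines.countP (fun line =>
            PySem.Set.issubset (PySem.Set.ofList (PySem.Chars.splitOn ck [' ']))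
              (PySem.Set.ofList (PySem.Chars.splitOn line.toList [' ']))) : Int))) := by
  intro lines
  induction lines with
  | nil =>
    intro d cks v hnd hitems
    simp [hitems]
  | cons line rest ih =>
    intro d cks v hnd hitems
    have hkeys : d.keys = cks := by
      calc d.keys = (cks.map (fun ck => (ck, v ck))).map (fun p => p.1) := by rw [← hitems]; rfl
        _ = cks := by simp [Function.comp_def]
    have hdnd : d.keys.Nodup := hkeys ▸ hnd
    have hc : ∀ k ∈ d.keys, d.contains k = true := by
      intro k hk
      rw [PySem.Dict.contains_eq_decide_mem_keys]
      simp [hk]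
    rw [List.foldl_cons]
    rw [ih _ cks (fun ck => v ck + (if PySem.Set.issubset (PySem.Set.ofList (PySem.Chars.splitOn ck [' ']))
            (PySem.Set.ofList (PySem.Chars.splitOn line.toList [' '])) then 1 else 0)) hnd ?_]
    · apply List.map_congr_left
      intro ck hck
      simp only [Prod.mk.injEq, true_and, List.countP_cons]
      by_cases hq : PySem.Set.issubset (PySem.Set.ofList (PySem.Chars.splitOn ck [' ']))
            (PySem.Set.ofList (PySem.Chars.splitOn line.toList [' '])) = true
      · simp [hq]; ring
      · simp [hq]
    · rw [modify_loop _ d.keys d hdnd hdnd hc, hitems, List.map_map]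
      apply List.map_congr_left
      intro ck hck
      have hmem : ck ∈ d.keys := by rw [hkeys]; exact hck
      by_cases hq : PySem.Set.issubset (PySem.Set.ofList (PySem.Chars.splitOn ck [' ']))
            (PySem.Set.ofList (PySem.Chars.splitOn line.toList [' '])) = true
      · simp only [Function.comp_apply]
        rw [if_pos ⟨hmem, hq⟩, if_pos hq]
      · simp only [Function.comp_apply]
        rw [if_neg (fun h => hq h.2), if_neg hq]
        simp

-- ---- B's per-line `hits` set: membership and distinctness ----
theorem mem_foldl_addif (cont : List Char → Bool) (k1 : List Char) :
    ∀ (l : List (List Char)) (h : PySem.Set (List Char)) (x : List Char),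
    (x ∈ l.foldl (fun h k2 =>
        if k1 ≠ k2 ∧ cont (k1 ++ ' ' :: k2) = true then PySem.Set.add h (k1 ++ ' ' :: k2) else h) h) ↔
      x ∈ h ∨ ∃ k2 ∈ l, k1 ≠ k2 ∧ cont (k1 ++ ' ' :: k2) = true ∧ x = k1 ++ ' ' :: k2 := by
  intro l
  induction l with
  | nil => intro h x; simp
  | cons k2 rest ih =>
    intro h x
    rw [List.foldl_cons]
    by_cases hc : k1 ≠ k2 ∧ cont (k1 ++ ' ' :: k2) = true
    · rw [if_pos hc, ih]
      rw [PySem.Set.mem_add]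
      constructor
      · rintro ((hx | hx) | hx)
        · exact Or.inl hx
        · exact Or.inr ⟨k2, by simp, hc.1, hc.2, hx⟩
        · rcases hx with ⟨k', hk', h1, h2, h3⟩
          exact Or.inr ⟨k', by simp [hk'], h1, h2, h3⟩
      · rintro (hx | ⟨k', hk', h1, h2, h3⟩)
        · exact Or.inl (Or.inl hx)
        · rcases List.mem_cons.mp hk' with rfl | hk'
          · exact Or.inl (Or.inr h3)
          · exact Or.inr ⟨k', hk', h1, h2, h3⟩
    · rw [if_neg hc, ih]
      constructor
      · rintro (hx | ⟨k', hk', h1, h2, h3⟩)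
        · exact Or.inl hx
        · exact Or.inr ⟨k', by simp [hk'], h1, h2, h3⟩
      · rintro (hx | ⟨k', hk', h1, h2, h3⟩)
        · exact Or.inl hx
        · rcases List.mem_cons.mp hk' with rfl | hk'
          · exact absurd ⟨h1, h2⟩ hc
          · exact Or.inr ⟨k', hk', h1, h2, h3⟩

theorem mem_hits (cont : List Char → Bool) (present : List (List Char)) (x : List Char) :
    (x ∈ present.foldl (fun h k1 =>
        present.foldl (fun h k2 =>
          if k1 ≠ k2 ∧ cont (k1 ++ ' ' :: k2) = true then PySem.Set.add h (k1 ++ ' ' :: k2) else h) h)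
        PySem.Set.empty) ↔
      ∃ k1 ∈ present, ∃ k2 ∈ present, k1 ≠ k2 ∧ cont (k1 ++ ' ' :: k2) = true ∧ x = k1 ++ ' ' :: k2 := by
  have main : ∀ (l : List (List Char)) (h : PySem.Set (List Char)),
      (x ∈ l.foldl (fun h k1 =>
        present.foldl (fun h k2 =>
          if k1 ≠ k2 ∧ cont (k1 ++ ' ' :: k2) = true then PySem.Set.add h (k1 ++ ' ' :: k2) else h) h) h) ↔
      x ∈ h ∨ ∃ k1 ∈ l, ∃ k2 ∈ present, k1 ≠ k2 ∧ cont (k1 ++ ' ' :: k2) = true ∧ x = k1 ++ ' ' :: k2 := by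
    intro l
    induction l with
    | nil => intro h; simp
    | cons k1 rest ih =>
      intro h
      rw [List.foldl_cons, ih, mem_foldl_addif]
      constructor
      · rintro ((hx | ⟨k2, hk2, h1, h2, h3⟩) | ⟨k1', hk1', rest'⟩)
        · exact Or.inl hx
        · exact Or.inr ⟨k1, by simp, k2, hk2, h1, h2, h3⟩
        · exact Or.inr ⟨k1', by simp [hk1'], rest'⟩
      · rintro (hx | ⟨k1', hk1', rest'⟩)
        · exact Or.inl (Or.inl hx)
        · rcases List.mem_cons.mp hk1' with rfl | hk1'
          · exact Or.inl (Or.inr rest')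
          · exact Or.inr ⟨k1', hk1', rest'⟩
  rw [main present PySem.Set.empty]
  simp [PySem.Set.empty]

theorem nodup_foldl_addif (cont : List Char → Bool) (k1 : List Char) :
    ∀ (l : List (List Char)) (h : PySem.Set (List Char)), h.Nodup →
    (l.foldl (fun h k2 =>
        if k1 ≠ k2 ∧ cont (k1 ++ ' ' :: k2) = true then PySem.Set.add h (k1 ++ ' ' :: k2) else h) h).Nodup := by
  intro l
  induction l with
  | nil => intro h hh; exact hh
  | cons k2 rest ih =>
    intro h hh
    rw [List.foldl_cons]
    by_cases hc : k1 ≠ k2 ∧ cont (k1 ++ ' ' :: k2) = true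
    · rw [if_pos hc]; exact ih _ (PySem.Set.nodup_add h _ hh)
    · rw [if_neg hc]; exact ih _ hh

theorem nodup_hits (cont : List Char → Bool) (present : List (List Char)) :
    (present.foldl (fun h k1 =>
        present.foldl (fun h k2 =>
          if k1 ≠ k2 ∧ cont (k1 ++ ' ' :: k2) = true then PySem.Set.add h (k1 ++ ' ' :: k2) else h) h)
        PySem.Set.empty).Nodup := by
  have main : ∀ (l : List (List Char)) (h : PySem.Set (List Char)), h.Nodup →
      (l.foldl (fun h k1 =>
        present.foldl (fun h k2 =>
          if k1 ≠ k2 ∧ cont (k1 ++ ' ' :: k2) = true then PySem.Set.add h (k1 ++ ' ' :: k2) else h) h) h).Nodup := by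
    intro l
    induction l with
    | nil => intro h hh; exact hh
    | cons k1 rest ih =>
      intro h hh
      exact ih _ (nodup_foldl_addif cont k1 present h hh)
  exact main present PySem.Set.empty List.nodup_nil

-- B's increment pass over the hits list
theorem incr_loop :
    ∀ (ks : List (List Char)) (d : PySem.Dict (List Char) Int),
    d.keys.Nodup → ks.Nodup → (∀ k ∈ ks, d.contains k = true) →
    (ks.foldl (fun d' k => d'.modify k 0 (· + 1)) d).items =
      d.items.map (fun p => if p.1 ∈ ks then (p.1, p.2 + 1) else p) := by
  intro ks d hdnd hnd hc
  have hfun : (fun (d' : PySem.Dict (List Char) Int) (k : List Char) =>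
      if (fun (_ : List Char) => true) k then d'.modify k 0 (· + 1) else d')
      = fun d' k => d'.modify k 0 (· + 1) := by
    funext d' k; simp
  rw [← hfun, modify_loop (fun _ => true) ks d hdnd hnd hc]
  simp

-- B's per-line step, characterised: every candidate both of whose items occur in the line gains 1
theorem lineB_step (keys0 : List (List Char)) (line : String)
    (d : PySem.Dict (List Char) Int) (cks : List (List Char)) (v : List Char → Int)
    (hnd : cks.Nodup)
    (hdec : ∀ c ∈ cks, ∃ a, a ∈ keys0 ∧ ∃ b, b ∈ keys0 ∧ a ≠ b ∧ c = a ++ ' ' :: b)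
    (hitems : d.items = cks.map (fun ck => (ck, v ck))) :
    (((keys0.filter (fun k => PySem.Set.issubset (altWordOf k)
        (PySem.Set.ofList (PySem.Chars.splitOn line.toList [' '])))).foldl (fun h k1 =>
      (keys0.filter (fun k => PySem.Set.issubset (altWordOf k)
        (PySem.Set.ofList (PySem.Chars.splitOn line.toList [' '])))).foldl (fun h k2 =>
        if k1 ≠ k2 ∧ d.contains (k1 ++ ' ' :: k2) = true then PySem.Set.add h (k1 ++ ' ' :: k2)
        else h) h) PySem.Set.empty).foldl (fun C' c => C'.modify c 0 (· + 1)) d).items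
      = cks.map (fun ck => (ck, v ck +
        (if PySem.Set.issubset (PySem.Set.ofList (PySem.Chars.splitOn ck [' ']))
            (PySem.Set.ofList (PySem.Chars.splitOn line.toList [' '])) then 1 else 0))) := by
  have hkeys : d.keys = cks := by
    calc d.keys = (cks.map (fun ck => (ck, v ck))).map (fun p => p.1) := by rw [← hitems]; rfl
      _ = cks := by simp [Function.comp_def]
  have hdnd : d.keys.Nodup := hkeys ▸ hnd
  set lw := PySem.Set.ofList (PySem.Chars.splitOn line.toList [' ']) with hlw
  set present := keys0.filter (fun k => PySem.Set.issubset (altWordOf k) lw) with hpres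
  set hits := present.foldl (fun h k1 =>
      present.foldl (fun h k2 =>
        if k1 ≠ k2 ∧ d.contains (k1 ++ ' ' :: k2) = true then PySem.Set.add h (k1 ++ ' ' :: k2)
        else h) h) PySem.Set.empty with hhits
  have hmemhits : ∀ x, x ∈ hits ↔
      ∃ k1 ∈ present, ∃ k2 ∈ present, k1 ≠ k2 ∧ d.contains (k1 ++ ' ' :: k2) = true ∧ x = k1 ++ ' ' :: k2 := by
    intro x; rw [hhits]; exact mem_hits (fun c => d.contains c) present x
  have hconmem : ∀ x, d.contains x = true ↔ x ∈ cks := by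
    intro x
    rw [PySem.Dict.contains_eq_decide_mem_keys, hkeys]
    simp
  have hsub : ∀ k ∈ hits, d.contains k = true := by
    intro k hk
    rcases (hmemhits k).mp hk with ⟨k1, _, k2, _, _, hcon, rfl⟩
    exact hcon
  rw [incr_loop hits d hdnd (nodup_hits _ _) hsub, hitems, List.map_map]
  apply List.map_congr_left
  intro ck hck
  have hchar : ck ∈ hits ↔ PySem.Set.issubset (PySem.Set.ofList (PySem.Chars.splitOn ck [' '])) lw = true := by
    constructor
    · intro hk
      rcases (hmemhits ck).mp hk with ⟨k1, hk1, k2, hk2, _, _, rfl⟩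
      have h1 := (List.mem_filter.mp (hpres ▸ hk1)).2
      have h2 := (List.mem_filter.mp (hpres ▸ hk2)).2
      exact (subset_cand_iff k1 k2 lw).mpr ⟨by simpa using h1, by simpa using h2⟩
    · intro hsubck
      rcases hdec ck hck with ⟨a, ha, b, hb, hab, rfl⟩
      have := (subset_cand_iff a b lw).mp hsubck
      refine (hmemhits _).mpr ⟨a, ?_, b, ?_, hab, (hconmem _).mpr hck, rfl⟩
      · rw [hpres]; exact List.mem_filter.mpr ⟨ha, by simpa using this.1⟩
      · rw [hpres]; exact List.mem_filter.mpr ⟨hb, by simpa using this.2⟩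
  by_cases hq : PySem.Set.issubset (PySem.Set.ofList (PySem.Chars.splitOn ck [' '])) lw = true
  · simp only [Function.comp_apply]
    rw [if_pos (hchar.mpr hq), if_pos hq]
  · simp only [Function.comp_apply]
    rw [if_neg (fun hm => hq (hchar.mp hm)), if_neg hq]
    simp

-- B's database loop
theorem textB_loop (keys0 : List (List Char)) :
    ∀ (lines : List String) (d : PySem.Dict (List Char) Int)
      (cks : List (List Char)) (v : List Char → Int),
    cks.Nodup →
    (∀ c ∈ cks, ∃ a, a ∈ keys0 ∧ ∃ b, b ∈ keys0 ∧ a ≠ b ∧ c = a ++ ' ' :: b) →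
    d.items = cks.map (fun ck => (ck, v ck)) →
    (lines.foldl (fun C line =>
      ((keys0.filter (fun k => PySem.Set.issubset (altWordOf k)
          (PySem.Set.ofList (PySem.Chars.splitOn line.toList [' '])))).foldl (fun h k1 =>
        (keys0.filter (fun k => PySem.Set.issubset (altWordOf k)
          (PySem.Set.ofList (PySem.Chars.splitOn line.toList [' '])))).foldl (fun h k2 =>
          if k1 ≠ k2 ∧ C.contains (k1 ++ ' ' :: k2) = true then PySem.Set.add h (k1 ++ ' ' :: k2)
          else h) h) PySem.Set.empty).foldl (fun C' c => C'.modify c 0 (· + 1)) C) d).items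
      = cks.map (fun ck => (ck,
          v ck + (lines.countP (fun line =>
            PySem.Set.issubset (PySem.Set.ofList (PySem.Chars.splitOn ck [' ']))
              (PySem.Set.ofList (PySem.Chars.splitOn line.toList [' ']))) : Int))) := by
  intro lines
  induction lines with
  | nil =>
    intro d cks v hnd _ hitems
    simp [hitems]
  | cons line rest ih =>
    intro d cks v hnd hdec hitems
    rw [List.foldl_cons]
    rw [ih _ cks (fun ck => v ck + (if PySem.Set.issubset (PySem.Set.ofList (PySem.Chars.splitOn ck [' ']))
            (PySem.Set.ofList (PySem.Chars.splitOn line.toList [' '])) then 1 else 0)) hnd hdec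
          (lineB_step keys0 line d cks v hnd hdec hitems)]
    apply List.map_congr_left
    intro ck hck
    simp only [Prod.mk.injEq, true_and, List.countP_cons]
    by_cases hq : PySem.Set.issubset (PySem.Set.ofList (PySem.Chars.splitOn ck [' ']))
          (PySem.Set.ofList (PySem.Chars.splitOn line.toList [' '])) = true
    · simp [hq]; ring
    · simp [hq]

-- ===== VERDICT =====
theorem no_cut_candidate_item_spec : Claim_equal_no_cut_candidate_item := by
  intro L text hdom
  unfold Spec_no_cut_candidate_item
  set keys : List (List Char) := PySem.List.dedup (L.map (fun p => p.1.toList)) with hkeysdef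
  set C0 : PySem.Dict (List Char) Int :=
    keys.foldl (fun C k1 =>
      keys.foldl (fun C k2 =>
        if k1 ≠ k2 ∧ ¬ C.contains (k2 ++ ' ' :: k1) = true then C.insert (k1 ++ ' ' :: k2) 0
        else C) C) PySem.Dict.empty with hC0
  have hgen : genInv keys C0 := by
    rw [hC0]
    exact genOuter_inv keys keys (fun _ hk => hk) PySem.Dict.empty
      ⟨rfl, List.nodup_nil, by intro c hc; simp [PySem.Dict.empty, PySem.Dict.keys] at hc⟩
  have hgenEq :
      (keys.foldl (fun C k1 =>
        keys.foldl (fun C k2 =>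
          if k1 ≠ k2 then
            if C.contains (k2 ++ ' ' :: k1) then C
            else C.insert (k1 ++ ' ' :: k2) 0
          else C) C) PySem.Dict.empty) = C0 := by
    rw [hC0]
    have : (fun (C : PySem.Dict (List Char) Int) (k1 : List Char) =>
        keys.foldl (fun C k2 =>
          if k1 ≠ k2 then
            if C.contains (k2 ++ ' ' :: k1) then C
            else C.insert (k1 ++ ' ' :: k2) 0
          else C) C)
        = (fun (C : PySem.Dict (List Char) Int) (k1 : List Char) =>
        keys.foldl (fun C k2 =>
          if k1 ≠ k2 ∧ ¬ C.contains (k2 ++ ' ' :: k1) = true then C.insert (k1 ++ ' ' :: k2) 0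
          else C) C) := by
      funext C k1
      rw [genStep_eq k1]
    rw [this]
  have hitems0 : C0.items = C0.keys.map (fun k => (k, (0 : Int))) := hgen.1
  have hA := text_loop text C0 C0.keys (fun _ => (0 : Int)) hgen.2.1 hitems0
  have hB := textB_loop keys text C0 C0.keys (fun _ => (0 : Int)) hgen.2.1 hgen.2.2 hitems0
  simp only [no_cut_candidate_item, no_cut_candidate_item_alt]
  rw [← hkeysdef, hgenEq, ← hC0, hA, hB]
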